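-- pv_equiv track=rewrite | github.com/Satira-bot/artifact_butler | src/pages/calculator_page.py | group_by_char_length
-- ===== SOURCE A (Python) =====
-- from typing import Dict, List, Any
--
-- def group_by_char_length(items: List[str], max_chars: int = 50, overhead: int = 3):
--     rows, cur, cur_len = [], [], 0
--     for itm in items:
--         ln = len(itm) + overhead
--         if cur and cur_len + ln > max_chars:
--             rows.append(cur)
--             cur, cur_len = [], 0
--         cur.append(itm)
--         cur_len += ln
--     if cur:
--         rows.append(cur)
--     return rows
-- ===== SOURCE B (Python) =====
-- def group_by_char_length(items, max_chars=50, overhead=3):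
--     if not items:
--         return []
--     # Stage 1: compute only the index at which each row starts.
--     starts = [0]
--     run = len(items[0]) + overhead
--     for j in range(1, len(items)):
--         c = len(items[j]) + overhead
--         if run + c > max_chars:
--             starts.append(j)
--             run = c
--         else:
--             run += c
--     # Stage 2: cut items at those boundaries.
--     bounds = starts + [len(items)]
--     return [items[a:b] for a, b in zip(bounds, bounds[1:])]
-- ===== Notes on version B (the rewrite author's own statement) =====
-- stated objective: alternative
-- what changed: B splits the work into two stages: a first scan computes only the integer start index of each row, then the rows are produced by slicing the input at consecutive boundary pairs (zip of bounds); A instead builds the row lists themselves inside a single accumulator fold with a flush-on-overflow branch.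
import Mathlib
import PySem

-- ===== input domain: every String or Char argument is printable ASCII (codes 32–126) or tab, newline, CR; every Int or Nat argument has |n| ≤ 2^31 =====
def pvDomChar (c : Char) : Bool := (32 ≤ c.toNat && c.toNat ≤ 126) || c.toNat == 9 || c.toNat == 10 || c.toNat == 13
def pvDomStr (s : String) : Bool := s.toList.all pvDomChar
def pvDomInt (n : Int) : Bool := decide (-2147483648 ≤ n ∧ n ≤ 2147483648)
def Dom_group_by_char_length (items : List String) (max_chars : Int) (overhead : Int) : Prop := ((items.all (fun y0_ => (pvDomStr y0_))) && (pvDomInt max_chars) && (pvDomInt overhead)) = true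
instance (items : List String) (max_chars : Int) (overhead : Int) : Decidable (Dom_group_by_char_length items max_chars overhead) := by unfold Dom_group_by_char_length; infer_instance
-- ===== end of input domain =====

-- B is a staged re-implementation (alternative decomposition, same O(n) cost): it first computes only the
-- start indices of the rows, then cuts the input list at those boundaries by slicing; A builds the rows
-- directly in a single accumulator fold.

-- ===== PORT A =====
def pvStepA (max_chars overhead : Int) (st : List (List String) × List String × Int) (itm : String) :
    List (List String) × List String × Int :=
  let ln := PySem.Str.len itm + overhead
  match st with
  | (rows, cur, cur_len) =>
    if cur ≠ [] ∧ cur_len + ln > max_chars then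
      (rows ++ [cur], [itm], ln)
    else
      (rows, cur ++ [itm], cur_len + ln)

def group_by_char_length (items : List String) (max_chars : Int) (overhead : Int) : List (List String) :=
  let st := items.foldl (pvStepA max_chars overhead) ([], [], 0)
  if st.2.1 = [] then st.1 else st.1 ++ [st.2.1]

-- ===== PORT B =====
-- stage-1 loop body of Source B: state (starts, run), one step per index j in range(1, len(items))
def pvStepB (items : List String) (max_chars overhead : Int) (st : List Int × Int) (j : Int) :
    List Int × Int :=
  let c := PySem.Str.len (PySem.List.pyGetD items j "") + overhead
  if st.2 + c > max_chars then (st.1 ++ [j], c) else (st.1, st.2 + c)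

def group_by_char_length_alt (items : List String) (max_chars : Int) (overhead : Int) : List (List String) :=
  if items = [] then []
  else
    let st := (PySem.List.pyRange 1 (items.length : Int) 1).foldl (pvStepB items max_chars overhead)
      ([0], PySem.Str.len (PySem.List.pyGetD items 0 "") + overhead)
    let bounds := st.1 ++ [(items.length : Int)]
    (bounds.zip (bounds.drop 1)).map (fun ab => PySem.List.slice items (some ab.1) (some ab.2))

-- ===== PRECONDITION & SPEC =====
def Spec_group_by_char_length (items : List String) (max_chars : Int) (overhead : Int) (out : List (List String)) : Prop := out = group_by_char_length_alt items max_chars overhead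
instance (items : List String) (max_chars : Int) (overhead : Int) (out : List (List String)) : Decidable (Spec_group_by_char_length items max_chars overhead out) := by unfold Spec_group_by_char_length; infer_instance

-- ===== CLAIM (what is proved, stated in full; the proofs are below) =====
def Claim_equal_group_by_char_length : Prop := ∀ (items : List String) (max_chars : Int) (overhead : Int), Dom_group_by_char_length items max_chars overhead → Spec_group_by_char_length items max_chars overhead (group_by_char_length items max_chars overhead)

-- ===== LEMMAS AND PROOFS =====
-- cutting items at boundaries s₀ < s₁ < … with final bound n (proof-only helper)
def pvChop (items : List String) (n : Int) : List Int → List (List String)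
  | [] => []
  | s :: rest => PySem.List.slice items (some s) (some (rest.headD n)) :: pvChop items n rest

theorem pvChop_cons (items : List String) (n : Int) (s : Int) (rest : List Int) :
    pvChop items n (s :: rest)
    = PySem.List.slice items (some s) (some (rest.headD n)) :: pvChop items n rest := rfl

-- B's stage 2 (zip of consecutive bounds, then slice) is pvChop
theorem pv_zip_chop (items : List String) (n : Int) :
    ∀ (l : List Int) (b : Int),
      (((b :: l ++ [n]).zip ((b :: l ++ [n]).drop 1)).map
        (fun ab => PySem.List.slice items (some ab.1) (some ab.2)))
      = pvChop items n (b :: l) := by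
  intro l
  induction l with
  | nil => intro b; simp [pvChop]
  | cons s t ih =>
    intro b
    simp only [List.cons_append, List.drop_succ_cons, List.drop_zero, List.zip_cons_cons,
      List.map_cons, pvChop, List.headD_cons]
    have := ih s
    simp only [List.cons_append, List.drop_succ_cons, List.drop_zero] at this
    rw [this, pvChop_cons]

-- the starts accumulator of B's stage-1 fold is append-only
theorem pv_foldB_acc (items : List String) (max_chars overhead : Int) :
    ∀ (idxs : List Int) (acc : List Int) (run : Int),
      idxs.foldl (pvStepB items max_chars overhead) (acc, run)
      = (acc ++ (idxs.foldl (pvStepB items max_chars overhead) ([], run)).1,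
         (idxs.foldl (pvStepB items max_chars overhead) ([], run)).2) := by
  intro idxs
  induction idxs with
  | nil => intro acc run; simp
  | cons j rest ih =>
    intro acc run
    simp only [List.foldl_cons, pvStepB]
    split
    · rw [ih (acc ++ [j]), ih ([] ++ [j])]
      simp
    · exact ih acc _

-- main invariant: A's fold from a nonempty current row items[s:j] equals rows ++ chop of B's remaining breaks
theorem pv_main (max_chars overhead : Int) (items : List String) :
    ∀ (k j s : Nat), j + k = items.length → s < j →
      ∀ (rows : List (List String)) (run : Int),
      (if ((items.drop j).foldl (pvStepA max_chars overhead)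
            (rows, PySem.List.slice items (some (s : Int)) (some (j : Int)), run)).2.1 = []
        then ((items.drop j).foldl (pvStepA max_chars overhead)
            (rows, PySem.List.slice items (some (s : Int)) (some (j : Int)), run)).1
        else ((items.drop j).foldl (pvStepA max_chars overhead)
            (rows, PySem.List.slice items (some (s : Int)) (some (j : Int)), run)).1
          ++ [((items.drop j).foldl (pvStepA max_chars overhead)
            (rows, PySem.List.slice items (some (s : Int)) (some (j : Int)), run)).2.1])
      = rows ++ pvChop items (items.length : Int)
          ((s : Int) :: ((PySem.List.pyRange (j : Int) (items.length : Int) 1).foldl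
            (pvStepB items max_chars overhead) ([], run)).1) := by
  intro k
  induction k with
  | zero =>
    intro j s hj hs rows run
    have hjn : j = items.length := by omega
    subst hjn
    have hne : PySem.List.slice items (some (s : Int)) (some (items.length : Int)) ≠ [] := by
      intro h
      have hlen := PySem.List.length_slice items (s : Int) (items.length : Int)
      rw [h] at hlen
      simp at hlen
      omega
    rw [PySem.List.pyRange_one_eq_nil (le_refl _)]
    simp [hne, pvChop]
  | succ k ih =>
    intro j s hj hs rows run
    have hjlt : j < items.length := by omega
    have hdrop : items.drop j = items[j] :: items.drop (j + 1) := by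
      rw [List.getElem_cons_drop]
    have hget : PySem.List.pyGetD items (j : Int) "" = items[j] := by
      rw [PySem.List.pyGetD_natCast]
      exact List.getD_eq_getElem items "" hjlt
    have hsjne : PySem.List.slice items (some (s : Int)) (some (j : Int)) ≠ [] := by
      have hlen := PySem.List.length_slice items (s : Int) (j : Int)
      intro h
      rw [h] at hlen
      simp at hlen
      omega
    have hrange : PySem.List.pyRange (j : Int) (items.length : Int) 1
        = (j : Int) :: PySem.List.pyRange ((j : Int) + 1) (items.length : Int) 1 :=
      PySem.List.pyRange_one_cons (by exact_mod_cast hjlt)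
    have hcast : ((j : Int) + 1) = ((j + 1 : Nat) : Int) := by push_cast; ring
    set c := PySem.Str.len items[j] + overhead with hc
    rw [hdrop]
    by_cases hcond : run + c > max_chars
    · -- flush: new row starts at j
      have hstep : pvStepA max_chars overhead
          (rows, PySem.List.slice items (some (s : Int)) (some (j : Int)), run) items[j]
          = (rows ++ [PySem.List.slice items (some (s : Int)) (some (j : Int))], [items[j]], c) := by
        have hp : PySem.List.slice items (some (s : Int)) (some (j : Int)) ≠ [] ∧
            run + (PySem.Str.len items[j] + overhead) > max_chars := ⟨hsjne, hcond⟩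
        simp only [pvStepA]
        rw [if_pos hp]
      have hsingle : [items[j]] = PySem.List.slice items (some (j : Int)) (some ((j + 1 : Nat) : Int)) := by
        rw [PySem.List.slice_natCast]
        have h1 : j + 1 - j = 1 := by omega
        rw [h1, hdrop]
        rfl
      simp only [List.foldl_cons, hstep]
      rw [hsingle]
      rw [ih (j + 1) j (by omega) (by omega)
        (rows ++ [PySem.List.slice items (some (s : Int)) (some (j : Int))]) c]
      -- now reduce the B side
      rw [hrange]
      simp only [List.foldl_cons, pvStepB, hget]
      rw [if_pos (by simpa [hc] using hcond)]
      rw [pv_foldB_acc items max_chars overhead _ ([] ++ [(j : Int)]) c]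
      simp only [List.nil_append, hcast]
      rw [pvChop_cons items ((items.length : Nat) : Int) ((s : Nat) : Int)]
      simp
    · -- items[j] joins the current row
      have hstep : pvStepA max_chars overhead
          (rows, PySem.List.slice items (some (s : Int)) (some (j : Int)), run) items[j]
          = (rows, PySem.List.slice items (some (s : Int)) (some (j : Int)) ++ [items[j]], run + c) := by
        have hp : ¬ (PySem.List.slice items (some (s : Int)) (some (j : Int)) ≠ [] ∧
            run + (PySem.Str.len items[j] + overhead) > max_chars) := by
          rintro ⟨_, h⟩; exact hcond h
        simp only [pvStepA]
        rw [if_neg hp]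
      have happ : PySem.List.slice items (some (s : Int)) (some (j : Int)) ++ [items[j]]
          = PySem.List.slice items (some (s : Int)) (some ((j + 1 : Nat) : Int)) := by
        rw [PySem.List.slice_natCast, PySem.List.slice_natCast]
        have h1 : j + 1 - s = (j - s) + 1 := by omega
        rw [h1, List.take_add_one]
        have h2 : (items.drop s)[j - s]? = some items[j] := by
          rw [List.getElem?_drop]
          have : s + (j - s) = j := by omega
          rw [this]
          exact List.getElem?_eq_getElem hjlt
        rw [h2]
        simp
      simp only [List.foldl_cons, hstep, happ]
      rw [ih (j + 1) s (by omega) (by omega) rows (run + c)]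
      rw [hrange]
      simp only [List.foldl_cons, pvStepB, hget]
      rw [if_neg (by simpa [hc] using hcond)]
      rw [hcast]

-- ===== VERDICT (by name: the statement is the Claim_ definition above) =====
theorem group_by_char_length_spec : Claim_equal_group_by_char_length := by
  intro items max_chars overhead _
  unfold Spec_group_by_char_length group_by_char_length group_by_char_length_alt
  cases items with
  | nil => simp
  | cons itm rest =>
    simp only [reduceCtorEq, if_false]
    have hlen : 0 < (itm :: rest).length := by simp
    have hstep : pvStepA max_chars overhead ([], [], 0) itm
        = ([], [itm], 0 + (PySem.Str.len itm + overhead)) := by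
      simp only [pvStepA, ne_eq, not_true_eq_false, false_and, if_false, List.nil_append]
    have hsingle : [itm] = PySem.List.slice (itm :: rest) (some ((0 : Nat) : Int)) (some ((1 : Nat) : Int)) := by
      rw [PySem.List.slice_natCast]; simp
    have hget0 : PySem.List.pyGetD (itm :: rest) ((0 : Nat) : Int) "" = itm := by
      rw [PySem.List.pyGetD_natCast]; simp
    simp only [List.foldl_cons, hstep]
    rw [hsingle]
    have H := pv_main max_chars overhead (itm :: rest) ((itm :: rest).length - 1) 1 0
      (by simp; omega) (by omega) [] (0 + (PySem.Str.len itm + overhead))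
    simp only [List.drop_one, List.tail_cons] at H
    rw [H]
    rw [pv_foldB_acc (itm :: rest) max_chars overhead _ [(0 : Int)]
      (PySem.Str.len (PySem.List.pyGetD (itm :: rest) 0 "") + overhead)]
    have hg : PySem.List.pyGetD (itm :: rest) (0 : Int) "" = itm := by
      exact_mod_cast hget0
    simp only [hg, Nat.cast_zero, Nat.cast_one, zero_add, List.nil_append,
      List.singleton_append]
    rw [pv_zip_chop (itm :: rest) (((itm :: rest).length : Nat) : Int)
      (((PySem.List.pyRange 1 (((itm :: rest).length : Nat) : Int) 1).foldl
        (pvStepB (itm :: rest) max_chars overhead)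
        ([], PySem.Str.len itm + overhead)).1) 0]
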